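-- pv_equiv track=rewrite | github.com/Karolis332/MTG-deck-builder | scripts/import_mtga_cards.py | convert_arena_mana_cost
-- ===== SOURCE A (Python) =====
-- def convert_arena_mana_cost(arena_cost: str) -> str:
--     """Convert Arena mana cost format (o2oUoU) to standard ({2}{U}{U})."""
--     if not arena_cost:
--         return ""
--     result = ""
--     i = 0
--     while i < len(arena_cost):
--         if arena_cost[i] == "o" and i + 1 < len(arena_cost):
--             symbol = arena_cost[i + 1]
--             # Handle multi-char costs like o10, o11, etc.
--             j = i + 2
--             while j < len(arena_cost) and arena_cost[j].isdigit():
--                 symbol += arena_cost[j]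
--                 j += 1
--             result += "{" + symbol + "}"
--             i = j
--         else:
--             i += 1
--     return result
-- ===== SOURCE B (Python) =====
-- import re
--
-- _TOKEN = re.compile(r"o([\s\S]\d*)")
--
--
-- def convert_arena_mana_cost(arena_cost: str) -> str:
--     """Convert Arena mana cost format (o2oUoU) to standard ({2}{U}{U})."""
--     return "".join("{" + sym + "}" for sym in _TOKEN.findall(arena_cost))
-- ===== Notes on version B (the rewrite author's own statement) =====
-- stated objective: faster
-- what changed: Replaces A's manual index-driven while-loop parser (with an inner digit-collecting loop and explicit i=j jumps) by a single compiled regex: re.findall(r'o([\s\S]\d*)') extracts every token in one non-overlapping scan and the result is a join of brace-wrapped matches.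
import Mathlib
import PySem

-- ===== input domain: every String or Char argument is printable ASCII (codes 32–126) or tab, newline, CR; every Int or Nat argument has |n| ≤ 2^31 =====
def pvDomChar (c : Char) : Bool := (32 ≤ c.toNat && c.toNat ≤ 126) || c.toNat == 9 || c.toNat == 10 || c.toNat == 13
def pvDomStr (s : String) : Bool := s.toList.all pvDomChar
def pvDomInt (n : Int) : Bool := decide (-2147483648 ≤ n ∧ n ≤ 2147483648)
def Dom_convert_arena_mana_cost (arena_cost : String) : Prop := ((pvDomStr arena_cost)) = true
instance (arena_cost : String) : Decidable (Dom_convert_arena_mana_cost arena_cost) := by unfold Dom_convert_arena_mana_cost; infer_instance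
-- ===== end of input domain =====

-- B replaces A's hand-rolled index/while parser by one regex findall over the string
-- and a join of brace-wrapped matches (objective: faster in a timing run's measurement).

-- ===== PORT A =====
-- inner `while j < len(...) and arena_cost[j].isdigit()` loop of A
def pvA_digits (cs : List Char) (j : Nat) (symbol : List Char) : List Char × Nat :=
  if h : j < cs.length then
    if PySem.Chars.isdigit cs[j] then
      pvA_digits cs (j + 1) (symbol ++ [cs[j]])
    else (symbol, j)
  else (symbol, j)
termination_by cs.length - j

-- needed by pvA_main's termination proof: the inner loop never moves j backwards
theorem pvA_digits_ge (cs : List Char) (j : Nat) (symbol : List Char) :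
    j ≤ (pvA_digits cs j symbol).2 := by
  fun_induction pvA_digits with
  | case1 j symbol h hd ih => omega
  | case2 j symbol h hd => simp
  | case3 j symbol h => simp

-- outer `while i < len(arena_cost)` loop of A, `result` accumulated as chars
def pvA_main (cs : List Char) (i : Nat) (result : List Char) : List Char :=
  if h : i < cs.length then
    if h2 : cs[i] = 'o' ∧ i + 1 < cs.length then
      let sj := pvA_digits cs (i + 2) [cs[i + 1]'h2.2]
      pvA_main cs sj.2 (result ++ '{' :: (sj.1 ++ ['}']))
    else
      pvA_main cs (i + 1) result
  else result
termination_by cs.length - i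
decreasing_by
  · have := pvA_digits_ge cs (i + 2) [cs[i + 1]'h2.2]; omega
  · omega

def convert_arena_mana_cost (arena_cost : String) : String :=
  if arena_cost = "" then ""
  else String.ofList (pvA_main arena_cost.toList 0 [])

-- ===== PORT B =====
-- hand port of re.findall(r"o([\s\S]\d*)"): the non-overlapping left-to-right scan —
-- at each position, either the pattern matches ('o', one arbitrary char, a greedy run
-- of digits; the captured group is everything after the 'o') and the scan resumes
-- after the match, or the scan moves one char right; exact for this pattern
def pvB_findall : List Char → List (List Char)
  | [] => []
  | c :: rest =>
    if c = 'o' then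
      match rest with
      | [] => []
      | c2 :: r2 =>
        (c2 :: r2.takeWhile PySem.Chars.isdigit) ::
          pvB_findall (r2.dropWhile PySem.Chars.isdigit)
    else pvB_findall rest
termination_by l => l.length
decreasing_by
  · have := (List.dropWhile_sublist (p := PySem.Chars.isdigit) (l := r2)).length_le
    simp; omega
  · simp

-- "".join("{" + sym + "}" for sym in matches)
def convert_arena_mana_cost_alt (arena_cost : String) : String :=
  String.ofList
    (((pvB_findall arena_cost.toList).map (fun sym => '{' :: (sym ++ ['}']))).flatten)

-- ===== PRECONDITION & SPEC =====
def Spec_convert_arena_mana_cost (arena_cost : String) (out : String) : Prop := out = convert_arena_mana_cost_alt arena_cost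
instance (arena_cost : String) (out : String) : Decidable (Spec_convert_arena_mana_cost arena_cost out) := by unfold Spec_convert_arena_mana_cost; infer_instance

-- ===== CLAIM (what is proved, stated in full; the proofs are below) =====
def Claim_equal_convert_arena_mana_cost : Prop := ∀ (arena_cost : String), Dom_convert_arena_mana_cost arena_cost → Spec_convert_arena_mana_cost arena_cost (convert_arena_mana_cost arena_cost)

-- ===== LEMMAS AND PROOFS =====

theorem pvA_digits_spec (cs : List Char) (j : Nat) (symbol : List Char) :
    pvA_digits cs j symbol =
      (symbol ++ (cs.drop j).takeWhile PySem.Chars.isdigit,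
       j + ((cs.drop j).takeWhile PySem.Chars.isdigit).length) := by
  fun_induction pvA_digits with
  | case1 j symbol h hd ih =>
    rw [ih, List.drop_eq_getElem_cons h, List.takeWhile_cons, hd]
    simp; omega
  | case2 j symbol h hd =>
    rw [List.drop_eq_getElem_cons h, List.takeWhile_cons]
    simp [hd]
  | case3 j symbol h =>
    rw [List.drop_eq_nil_of_le (by omega)]
    simp

theorem drop_len_takeWhile (p : Char → Bool) (l : List Char) :
    l.drop (l.takeWhile p).length = l.dropWhile p := by
  induction l with
  | nil => rfl
  | cons c t ih =>
    by_cases h : p c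
    · simp [h, ih]
    · simp [h]

theorem pvB_findall_cons_o (c2 : Char) (rest : List Char) :
    pvB_findall ('o' :: c2 :: rest) =
      (c2 :: rest.takeWhile PySem.Chars.isdigit) ::
        pvB_findall (rest.dropWhile PySem.Chars.isdigit) := by
  rw [pvB_findall.eq_def]; simp

theorem pvB_findall_cons_ne (c : Char) (rest : List Char) (hc : ¬ c = 'o') :
    pvB_findall (c :: rest) = pvB_findall rest := by
  rw [pvB_findall.eq_def]; simp [hc]

-- A's outer loop emits exactly the brace-wrapped regex matches of the remaining suffix
theorem pvA_main_spec (cs : List Char) (i : Nat) (result : List Char) :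
    pvA_main cs i result =
      result ++ ((pvB_findall (cs.drop i)).map (fun sym => '{' :: (sym ++ ['}']))).flatten := by
  fun_induction pvA_main with
  | case1 i result h h2 sj ih =>
    rw [ih]
    obtain ⟨ho, hlt⟩ := h2
    have hsj : sj = ([cs[i + 1]'hlt] ++ (cs.drop (i+2)).takeWhile PySem.Chars.isdigit,
        i + 2 + ((cs.drop (i+2)).takeWhile PySem.Chars.isdigit).length) :=
      pvA_digits_spec cs (i+2) [cs[i + 1]'hlt]
    rw [hsj]
    have e1 : cs.drop i = 'o' :: cs[i+1]'hlt :: cs.drop (i+2) := by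
      rw [List.drop_eq_getElem_cons h, List.drop_eq_getElem_cons hlt, ho]
    rw [e1]
    have e2 : cs.drop (i + 2 + ((cs.drop (i+2)).takeWhile PySem.Chars.isdigit).length)
        = (cs.drop (i+2)).dropWhile PySem.Chars.isdigit := by
      rw [← drop_len_takeWhile PySem.Chars.isdigit (cs.drop (i+2)), List.drop_drop]
    simp only [e2, pvB_findall_cons_o]
    simp
  | case2 i result h h2 ih =>
    rw [ih]
    rcases Nat.lt_or_ge (i+1) cs.length with h1 | h1
    · have e1 : cs.drop i = cs[i] :: cs[i+1]'h1 :: cs.drop (i+2) := by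
        rw [List.drop_eq_getElem_cons h, List.drop_eq_getElem_cons h1]
      have hne : ¬ cs[i] = 'o' := by
        intro hc; exact h2 ⟨hc, h1⟩
      rw [e1, pvB_findall_cons_ne _ _ hne, ← List.drop_eq_getElem_cons h1]
    · have e1 : cs.drop i = [cs[i]] := by
        rw [List.drop_eq_getElem_cons h, List.drop_eq_nil_of_le (by omega)]
      have e2 : cs.drop (i+1) = [] := List.drop_eq_nil_of_le (by omega)
      rw [e1, e2]
      by_cases hc : cs[i] = 'o'
      · rw [hc]; rw [pvB_findall.eq_def]; simp [pvB_findall]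
      · rw [pvB_findall_cons_ne _ _ hc]
  | case3 i result h =>
    rw [List.drop_eq_nil_of_le (by omega)]
    simp [pvB_findall]

-- ===== VERDICT (by name: the statement is the Claim_ definition above) =====
theorem convert_arena_mana_cost_spec : Claim_equal_convert_arena_mana_cost := by
  intro s _
  unfold Spec_convert_arena_mana_cost convert_arena_mana_cost convert_arena_mana_cost_alt
  by_cases h : s = ""
  · subst h; simp [pvB_findall]
  · simp only [h, if_false]
    rw [pvA_main_spec]
    simp
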